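-- pv_equiv track=rewrite | github.com/Ashilman25/CSE404Project | data_combine.py | split_regular_and_advanced
-- ===== SOURCE A (Python) =====
-- def split_regular_and_advanced(lines):
--     advanced_start_idx = None
--
--     for i, line in enumerate(lines):
--         if line.startswith("Rk,Player,Age,Team,Pos,G,GS,MP,PER,TS%"):
--             advanced_start_idx = i
--             break
--
--     if advanced_start_idx is None:
--         raise ValueError("Could not find advanced stats header in the file.")
--
--     regular_csv_text = "".join(lines[:advanced_start_idx])
--     advanced_csv_text = "".join(lines[advanced_start_idx:])
--
--     return regular_csv_text, advanced_csv_text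
-- ===== SOURCE B (Python) =====
-- def split_regular_and_advanced(lines):
--     found = False
--     regular = []
--     advanced = []
--     for line in lines:
--         if not found and line.startswith("Rk,Player,Age,Team,Pos,G,GS,MP,PER,TS%"):
--             found = True
--         if found:
--             advanced.append(line)
--         else:
--             regular.append(line)
--     if not found:
--         raise ValueError("Could not find advanced stats header in the file.")
--     return "".join(regular), "".join(advanced)
-- ===== Notes on version B (the rewrite author's own statement) =====
-- stated objective: simpler
-- what changed: Replaces the index-search plus two list slices and joins with a single pass that partitions lines into the two buckets using a boolean flag.
import Mathlib
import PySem

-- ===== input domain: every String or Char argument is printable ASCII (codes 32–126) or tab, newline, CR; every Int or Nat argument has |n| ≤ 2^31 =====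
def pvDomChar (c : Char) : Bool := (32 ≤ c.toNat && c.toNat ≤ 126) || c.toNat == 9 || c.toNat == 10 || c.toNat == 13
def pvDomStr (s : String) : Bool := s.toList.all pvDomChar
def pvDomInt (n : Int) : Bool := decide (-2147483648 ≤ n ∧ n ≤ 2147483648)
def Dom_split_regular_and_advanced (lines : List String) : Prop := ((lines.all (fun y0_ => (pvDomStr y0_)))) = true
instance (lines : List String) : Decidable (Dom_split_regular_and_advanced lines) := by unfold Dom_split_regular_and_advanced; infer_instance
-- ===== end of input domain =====

-- B replaces the index-search + two slices with a single partitioning pass with a boolean flag (simpler decomposition).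

-- ===== PORT A =====
def pvHdr : String := "Rk,Player,Age,Team,Pos,G,GS,MP,PER,TS%"

-- the enumerate loop: first index whose line starts with the header
def pvFindA (lines : List String) (i : Nat) : Option Nat :=
  match lines with
  | [] => none
  | l :: rest => if PySem.Str.startswith l pvHdr then some i else pvFindA rest (i + 1)

def split_regular_and_advanced (lines : List String) : String × String :=
  match pvFindA lines 0 with
  | none => ("", "")  -- Python raises ValueError here; excluded by Pre_
  | some idx => (PySem.Str.join "" (lines.take idx), PySem.Str.join "" (lines.drop idx))
      -- lines[:idx] / lines[idx:] with 0 ≤ idx ≤ len: exactly take/drop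

-- ===== PORT B =====
def pvLoopB (lines : List String) (found : Bool) (regular advanced : List String) :
    List String × List String :=
  match lines with
  | [] => (regular, advanced)
  | l :: rest =>
    let found' := if (!found) && PySem.Str.startswith l pvHdr then true else found
    if found' then pvLoopB rest found' regular (advanced ++ [l])
    else pvLoopB rest found' (regular ++ [l]) advanced

def split_regular_and_advanced_alt (lines : List String) : String × String :=
  let r := pvLoopB lines false [] []
  -- if the header is never found Python B raises ValueError; excluded by Pre_
  (PySem.Str.join "" r.1, PySem.Str.join "" r.2)

-- ===== PRECONDITION & SPEC =====
-- A (and B) raise ValueError when no line starts with the header; Pre_ excludes exactly those inputs.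
def Pre_split_regular_and_advanced (lines : List String) : Prop :=
  ∃ l ∈ lines, PySem.Str.startswith l pvHdr = true
instance (lines : List String) : Decidable (Pre_split_regular_and_advanced lines) := by
  unfold Pre_split_regular_and_advanced; infer_instance

def pvWitness_split_regular_and_advanced : List String :=
  ["a,b\n", "Rk,Player,Age,Team,Pos,G,GS,MP,PER,TS%,more\n", "1,2\n"]

def Spec_split_regular_and_advanced (lines : List String) (out : String × String) : Prop :=
  out = split_regular_and_advanced_alt lines
instance (lines : List String) (out : String × String) :
    Decidable (Spec_split_regular_and_advanced lines out) := by
  unfold Spec_split_regular_and_advanced; infer_instance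

-- ===== CLAIM (what is proved, stated in full; the proofs are below) =====
def Claim_equal_split_regular_and_advanced : Prop :=
  ∀ (lines : List String), Dom_split_regular_and_advanced lines →
    Pre_split_regular_and_advanced lines →
    Spec_split_regular_and_advanced lines (split_regular_and_advanced lines)

-- ===== LEMMAS AND PROOFS =====

-- offset-free first-match position, for reasoning
def pvPos (lines : List String) : Option Nat :=
  match lines with
  | [] => none
  | l :: rest => if PySem.Str.startswith l pvHdr then some 0 else (pvPos rest).map (· + 1)

theorem pvFindA_eq_pos (lines : List String) (k : Nat) :
    pvFindA lines k = (pvPos lines).map (· + k) := by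
  induction lines generalizing k with
  | nil => rfl
  | cons l rest ih =>
    simp only [pvFindA, pvPos]
    split
    · simp
    · rw [ih]; cases pvPos rest <;> simp [Nat.add_comm, Nat.add_left_comm]

theorem pvLoopB_true (lines : List String) (regular advanced : List String) :
    pvLoopB lines true regular advanced = (regular, advanced ++ lines) := by
  induction lines generalizing advanced with
  | nil => simp [pvLoopB]
  | cons l rest ih => simp [pvLoopB, ih]

theorem pvLoopB_false (lines : List String) (regular advanced : List String) :
    pvLoopB lines false regular advanced =
      match pvPos lines with
      | some i => (regular ++ lines.take i, advanced ++ lines.drop i)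
      | none => (regular ++ lines, advanced) := by
  induction lines generalizing regular advanced with
  | nil => simp [pvLoopB, pvPos]
  | cons l rest ih =>
    simp only [pvLoopB, pvPos]
    by_cases h : PySem.Str.startswith l pvHdr = true
    · have h2 : PySem.Chars.startswith l.toList pvHdr.toList = true := by
        simpa [PySem.Str.startswith] using h
      simp [h2, pvLoopB_true, List.append_assoc]
    · rw [Bool.not_eq_true] at h
      have h2 : PySem.Chars.startswith l.toList pvHdr.toList = false := by
        simpa [PySem.Str.startswith] using h
      cases hp : pvPos rest <;> simp [h2, hp, ih, List.append_assoc]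

theorem pvPos_none_iff (lines : List String) :
    pvPos lines = none ↔ ∀ l ∈ lines, PySem.Str.startswith l pvHdr = false := by
  induction lines with
  | nil => simp [pvPos]
  | cons l rest ih =>
    simp only [pvPos]
    by_cases h : PySem.Chars.startswith l.toList pvHdr.toList = true
    · simp [h]
    · cases hp : pvPos rest <;> simp_all [PySem.Str.startswith]

-- ===== VERDICT (by name: the statement is the Claim_ definition above) =====
theorem split_regular_and_advanced_spec : Claim_equal_split_regular_and_advanced := by
  intro lines _ hpre
  unfold Spec_split_regular_and_advanced split_regular_and_advanced split_regular_and_advanced_alt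
  rw [pvFindA_eq_pos, pvLoopB_false]
  cases hp : pvPos lines with
  | none =>
    obtain ⟨l, hl, hs⟩ := hpre
    have := (pvPos_none_iff lines).mp hp l hl
    rw [this] at hs; exact absurd hs (by simp)
  | some i => simp
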